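-- pv_equiv track=rewrite | github.com/pypi-data/pypi-mirror-391 | packages/survey-kit/survey_kit-0.1.2.tar.gz/survey_kit-0.1.2/src/survey_kit/statistics/basic_calculations.py | _check_special_modifiers
-- ===== SOURCE A (Python) =====
-- def _check_special_modifiers(column: str) -> tuple[str, str]:
--     #   Special modifiers - pipe separated
--     special_modifiers = ["missing", "notmissing", "not0", "is0", "share"]
--     modifier = ""
--     for modi in special_modifiers:
--         if column.endswith(f"|{modi}"):
--             column = column[0 : (len(column) - len(f"|{modi}"))]
--             modifier = modi
--
--     #   Aliases
--     column_original = column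
--     if column == "n":
--         column = "rawcount"
--     elif column == "weight":
--         column = "count"
--
--     return (column, modifier, column_original)
-- ===== SOURCE B (Python) =====
-- _MODIFIERS = frozenset({"missing", "notmissing", "not0", "is0", "share"})
-- _ALIASES = {"n": "rawcount", "weight": "count"}
--
--
-- def _check_special_modifiers(column: str) -> tuple[str, str]:
--     # A column may carry one special modifier as a pipe-separated suffix:
--     # "<name>|<modifier>".  Split off the trailing token and accept it if it
--     # is one of the known modifiers, then apply the column-name aliases.
--     head, sep, tail = column.rpartition("|")
--     modifier = ""
--     if sep and tail in _MODIFIERS: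
--         column = head
--         modifier = tail
--     column_original = column
--     column = _ALIASES.get(column, column)
--     return (column, modifier, column_original)
-- ===== Notes on version B (the rewrite author's own statement) =====
-- stated objective: simpler
-- what changed: B splits off the trailing pipe-separated token once with rpartition and accepts it if it is in the modifier set, instead of A's loop testing each of the five modifiers with endswith and slicing; aliases go through a dict lookup.
-- intended difference: On columns whose last two pipe-separated tokens are both modifiers with the second-from-last one later in the modifier list (e.g. 'x|share|missing'), A's single pass accidentally strips both tokens and returns ('x','share','x'), while B strips only the one trailing modifier token and returns ('x|share','missing','x|share'), the intended one-modifier-suffix parse. — e.g. on _check_special_modifiers("x|share|missing"): A returns ("x", "share", "x"), B returns ("x|share", "missing", "x|share")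
import Mathlib
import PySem

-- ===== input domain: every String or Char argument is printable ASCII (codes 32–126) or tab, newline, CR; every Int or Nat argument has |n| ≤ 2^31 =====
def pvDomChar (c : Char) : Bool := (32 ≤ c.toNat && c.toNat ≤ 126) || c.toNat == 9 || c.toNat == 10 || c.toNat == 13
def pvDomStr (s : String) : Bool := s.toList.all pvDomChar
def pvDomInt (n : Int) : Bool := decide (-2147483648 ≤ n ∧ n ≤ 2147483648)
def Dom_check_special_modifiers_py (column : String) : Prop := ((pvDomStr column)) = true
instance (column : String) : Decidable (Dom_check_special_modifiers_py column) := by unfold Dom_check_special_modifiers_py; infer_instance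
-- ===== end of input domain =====

-- B parses the modifier suffix with one rpartition + set membership instead of A's
-- five endswith passes; on a column whose last two tokens are both modifiers the two
-- differ (stated in D_ below). Objective: simpler.

-- ===== PORT A =====
-- A's literal modifier list (as code-point lists; PySem.Chars = Python str semantics)
def pvSpecialModifiers : List (List Char) :=
  ["missing".toList, "notmissing".toList, "not0".toList, "is0".toList, "share".toList]

-- one iteration of A's for-loop body: if column.endswith("|"+modi): strip it, record modi
def pvAStep (cm : List Char × List Char) (modi : List Char) : List Char × List Char :=
  if PySem.Chars.endswith cm.1 ('|' :: modi) then
    (PySem.Chars.slice cm.1 (some 0)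
        (some (PySem.Chars.len cm.1 - PySem.Chars.len ('|' :: modi))), modi)
  else cm

def check_special_modifiers_py (column : String) : String × String × String :=
  let res := pvSpecialModifiers.foldl pvAStep (column.toList, ([] : List Char))
  let column := res.1
  let modifier := res.2
  let column_original := column
  let column :=
    if column = "n".toList then "rawcount".toList
    else if column = "weight".toList then "count".toList
    else column
  (String.ofList column, String.ofList modifier, String.ofList column_original)

-- ===== PORT B =====
-- hand port of str.rpartition("|") (PySem has no rpartition), exact: (some head, tail) when a
-- '|' exists (column = head ++ '|' :: tail, tail = the part after the LAST '|'), else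
-- (none, column) — Python's (head, sep, tail) with sep's truthiness encoded by the Option
def pvRPartPipe : List Char → Option (List Char) × List Char
  | [] => (none, [])
  | x :: rest =>
    match pvRPartPipe rest with
    | (some h, t) => (some (x :: h), t)
    | (none, t) => if x = '|' then (some [], t) else (none, x :: t)

-- _MODIFIERS (a frozenset)
def pvModifiers : PySem.Set (List Char) :=
  PySem.Set.ofList
    ["missing".toList, "notmissing".toList, "not0".toList, "is0".toList, "share".toList]

-- _ALIASES
def pvAliases : PySem.Dict (List Char) (List Char) :=
  ((PySem.Dict.empty).insert "n".toList "rawcount".toList).insert "weight".toList "count".toList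

def check_special_modifiers_py_alt (column : String) : String × String × String :=
  let rp := pvRPartPipe column.toList
  let cm : List Char × List Char :=
    match rp.1 with
    | some head =>
        if PySem.Set.contains pvModifiers rp.2 then (head, rp.2) else (column.toList, [])
    | none => (column.toList, [])
  let column_original := cm.1
  let col := PySem.Dict.getD pvAliases cm.1 cm.1
  (String.ofList col, String.ofList cm.2, String.ofList column_original)

-- ===== PRECONDITION & SPEC =====
-- On columns whose last two pipe-separated tokens are both modifiers with the earlier one
-- (reading from the end) later in the modifier list, A accidentally strips BOTH tokens
-- (e.g. 'x|share|missing' → ('x','share','x')); B strips only the one trailing modifier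
-- token (→ ('x|share','missing','x|share')), the intended one-modifier-suffix parse.
def D_check_special_modifiers_py (column : String) : Prop :=
  ∃ s ∈ ["|notmissing|missing", "|not0|missing", "|is0|missing", "|share|missing",
         "|not0|notmissing", "|is0|notmissing", "|share|notmissing",
         "|is0|not0", "|share|not0", "|share|is0"],
    s.toList <:+ column.toList
instance (column : String) : Decidable (D_check_special_modifiers_py column) := by
  unfold D_check_special_modifiers_py; infer_instance

def Spec_check_special_modifiers_py (column : String) (out : String × String × String) : Prop :=
  ¬ D_check_special_modifiers_py column → out = check_special_modifiers_py_alt column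
instance (column : String) (out : String × String × String) :
    Decidable (Spec_check_special_modifiers_py column out) := by
  unfold Spec_check_special_modifiers_py; infer_instance

def pvDiffWitness_check_special_modifiers_py : String := "x|share|missing"
def pvDiffWitnessOut_check_special_modifiers_py :
    (String × String × String) × (String × String × String) :=
  (("x", "share", "x"), ("x|share", "missing", "x|share"))

-- ===== CLAIM (what is proved, stated in full; the proofs are below) =====
def Claim_unchanged_check_special_modifiers_py : Prop :=
  ∀ (column : String), Dom_check_special_modifiers_py column →
    Spec_check_special_modifiers_py column (check_special_modifiers_py column)
def Claim_changed_check_special_modifiers_py : Prop :=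
  Dom_check_special_modifiers_py pvDiffWitness_check_special_modifiers_py ∧
  D_check_special_modifiers_py pvDiffWitness_check_special_modifiers_py ∧
  check_special_modifiers_py pvDiffWitness_check_special_modifiers_py =
    pvDiffWitnessOut_check_special_modifiers_py.1 ∧
  check_special_modifiers_py_alt pvDiffWitness_check_special_modifiers_py =
    pvDiffWitnessOut_check_special_modifiers_py.2 ∧
  pvDiffWitnessOut_check_special_modifiers_py.1 ≠ pvDiffWitnessOut_check_special_modifiers_py.2
def Claim_exact_check_special_modifiers_py : Prop :=
  ∀ (column : String), Dom_check_special_modifiers_py column →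
    D_check_special_modifiers_py column →
    check_special_modifiers_py column ≠ check_special_modifiers_py_alt column

-- ===== LEMMAS AND PROOFS =====

-- the ten two-token suffixes of D_ (proof-side only)
def pvDSuffixes : List (List Char) :=
  ["|notmissing|missing".toList, "|not0|missing".toList, "|is0|missing".toList,
   "|share|missing".toList, "|not0|notmissing".toList, "|is0|notmissing".toList,
   "|share|notmissing".toList, "|is0|not0".toList, "|share|not0".toList,
   "|share|is0".toList]

theorem pvRPartPipe_none {c t : List Char} (hc : pvRPartPipe c = (none, t)) :
    t = c ∧ '|' ∉ c := by
  induction c generalizing t with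
  | nil => simp only [pvRPartPipe, Prod.mk.injEq] at hc; simp [hc.2.symm]
  | cons x rest ih =>
    simp only [pvRPartPipe] at hc
    rcases hrec : pvRPartPipe rest with ⟨ho, t'⟩
    rw [hrec] at hc
    cases ho with
    | some h' => simp at hc
    | none =>
      by_cases hx : x = '|' <;> simp [hx] at hc
      obtain ⟨rfl, rfl⟩ := hc
      obtain ⟨rfl, hnp⟩ := ih hrec
      exact ⟨rfl, by simp only [List.mem_cons, not_or]; exact ⟨fun hh => hx hh.symm, hnp⟩⟩

theorem pvRPartPipe_some {c h t : List Char} (hc : pvRPartPipe c = (some h, t)) :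
    c = h ++ '|' :: t ∧ '|' ∉ t := by
  induction c generalizing h t with
  | nil => simp [pvRPartPipe] at hc
  | cons x rest ih =>
    simp only [pvRPartPipe] at hc
    rcases hrec : pvRPartPipe rest with ⟨ho, t'⟩
    rw [hrec] at hc
    cases ho with
    | some h' =>
      simp only [Prod.mk.injEq, Option.some.injEq] at hc
      obtain ⟨rfl, rfl⟩ := hc
      obtain ⟨hrest, hnt⟩ := ih hrec
      exact ⟨by simp [hrest], hnt⟩
    | none =>
      by_cases hx : x = '|' <;> simp [hx] at hc
      obtain ⟨rfl, rfl⟩ := hc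
      obtain ⟨rfl, hnp⟩ := pvRPartPipe_none hrec
      exact ⟨by simp [hx], hnp⟩

theorem pvRPartPipe_no_pipe {c : List Char} (h : '|' ∉ c) : pvRPartPipe c = (none, c) := by
  induction c with
  | nil => rfl
  | cons x rest ih =>
    simp only [List.mem_cons, not_or] at h
    have hx : ¬ x = '|' := fun hh => h.1 hh.symm
    simp [pvRPartPipe, ih h.2, hx]

theorem pvRPartPipe_append {h t : List Char} (ht : '|' ∉ t) :
    pvRPartPipe (h ++ '|' :: t) = (some h, t) := by
  induction h with
  | nil => simp [pvRPartPipe, pvRPartPipe_no_pipe ht]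
  | cons x rest ih => simp [pvRPartPipe, ih]

-- trailing-token uniqueness: if the last token of c is t, c does not end with "|x" for x ≠ t
theorem pvEndsFalse_of_ne {c h t x : List Char} (hrp : pvRPartPipe c = (some h, t))
    (hx : '|' ∉ x) (hne : x ≠ t) :
    PySem.Chars.endswith c ('|' :: x) = false := by
  rw [Bool.eq_false_iff, Ne, PySem.Chars.endswith_iff]
  intro hsuf
  obtain ⟨pre, hpre⟩ := hsuf
  have hthis : pvRPartPipe c = (some pre, x) := by
    rw [← hpre]; exact pvRPartPipe_append hx
  rw [hrp] at hthis
  exact hne ((congrArg Prod.snd hthis).symm)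

-- no '|' in c: c ends with no "|x"
theorem pvEndsFalse_no_pipe {c x : List Char} (h : '|' ∉ c) :
    PySem.Chars.endswith c ('|' :: x) = false := by
  rw [Bool.eq_false_iff, Ne, PySem.Chars.endswith_iff]
  intro hsuf
  exact h (hsuf.mem (by simp))

-- a loop segment in which no modifier matches leaves the state unchanged
theorem pvFoldl_const {l : List (List Char)} {c m : List Char}
    (h : ∀ x ∈ l, PySem.Chars.endswith c ('|' :: x) = false) :
    List.foldl pvAStep (c, m) l = (c, m) := by
  induction l with
  | nil => rfl
  | cons x rest ih =>
    have hx := h x (by simp)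
    simp only [List.foldl_cons, pvAStep, hx, Bool.false_eq_true, if_false]
    exact ih fun y hy => h y (by simp [hy])

-- the matching step strips the trailing "|t"
theorem pvAStep_strip (h t m : List Char) : pvAStep (h ++ '|' :: t, m) t = (h, t) := by
  have hew : PySem.Chars.endswith (h ++ '|' :: t) ('|' :: t) = true := by
    rw [PySem.Chars.endswith_iff]; exact List.suffix_append h _
  have hlen : PySem.Chars.len (h ++ '|' :: t) - PySem.Chars.len ('|' :: t)
      = (h.length : Int) := by simp [PySem.Chars.len_eq]
  simp only [pvAStep, hew, if_true, hlen]
  simp only [PySem.Chars.slice_eq_listSlice]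
  rw [show ((0 : Int) = ((0 : Nat) : Int)) from rfl, PySem.List.slice_natCast]
  simp

-- a strip of "|x" from h lifts to a two-token suffix of h ++ "|t"
theorem pvEndsFalse_of_nd {h t x : List Char}
    (hnd : PySem.Chars.endswith (h ++ '|' :: t) ('|' :: x ++ '|' :: t) = false) :
    PySem.Chars.endswith h ('|' :: x) = false := by
  rw [Bool.eq_false_iff, Ne, PySem.Chars.endswith_iff] at hnd ⊢
  intro hsuf
  obtain ⟨pre, rfl⟩ := hsuf
  exact hnd ⟨pre, by simp⟩

-- one strip in the middle of A's loop: pre leaves the state alone, t strips, post leaves it alone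
theorem pvFold_case (c h t : List Char) (pre post : List (List Char))
    (hsplit : pvSpecialModifiers = pre ++ t :: post)
    (hc : c = h ++ '|' :: t)
    (hpre : ∀ x ∈ pre, PySem.Chars.endswith c ('|' :: x) = false)
    (hpost : ∀ x ∈ post, PySem.Chars.endswith h ('|' :: x) = false) :
    List.foldl pvAStep (c, ([] : List Char)) pvSpecialModifiers = (h, t) := by
  rw [hsplit, List.foldl_append, pvFoldl_const hpre, List.foldl_cons, hc, pvAStep_strip,
    pvFoldl_const hpost]

-- aliases: the dict lookup is A's if-chain
theorem pvAliases_getD (c : List Char) :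
    PySem.Dict.getD pvAliases c c =
      if c = "n".toList then "rawcount".toList
      else if c = "weight".toList then "count".toList
      else c := by
  simp only [pvAliases, PySem.Dict.getD_insert, PySem.Dict.getD_empty]
  by_cases h1 : c = "n".toList <;> by_cases h2 : c = "weight".toList <;>
    simp_all

-- a loop step never lengthens the working column
theorem pvAStep_len (st : List Char × List Char) (m : List Char) :
    (pvAStep st m).1.length ≤ st.1.length := by
  rcases st with ⟨c, mm⟩
  by_cases hew : PySem.Chars.endswith c ('|' :: m) = true
  · obtain ⟨h', rfl⟩ := (PySem.Chars.endswith_iff _ _).mp hew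
    rw [pvAStep_strip]
    simp
  · simp [pvAStep, hew]

theorem pvFoldl_len (l : List (List Char)) (st : List Char × List Char) :
    (List.foldl pvAStep st l).1.length ≤ st.1.length := by
  induction l generalizing st with
  | nil => exact le_refl _
  | cons x rest ih => exact le_trans (ih (pvAStep st x)) (pvAStep_len st x)

-- inside D_: A strips both trailing tokens while B strips one, so the third
-- components have different lengths and the results differ
theorem pvTight (column : String) (pre mi mj : List Char) (l1 l2 l3 : List (List Char))
    (hsplit : pvSpecialModifiers = l1 ++ mi :: (l2 ++ mj :: l3))
    (hc : column.toList = (pre ++ '|' :: mj) ++ '|' :: mi)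
    (hpi : '|' ∉ mi) (hpj : '|' ∉ mj)
    (h1 : ∀ x ∈ l1, '|' ∉ x ∧ x ≠ mi)
    (h2 : ∀ x ∈ l2, '|' ∉ x ∧ x ≠ mj)
    (hmi : PySem.Set.contains pvModifiers mi = true) :
    check_special_modifiers_py column ≠ check_special_modifiers_py_alt column := by
  intro heq
  have hrp : pvRPartPipe column.toList = (some (pre ++ '|' :: mj), mi) := by
    rw [hc]; exact pvRPartPipe_append hpi
  have hrp2 : pvRPartPipe (pre ++ '|' :: mj) = (some pre, mj) := pvRPartPipe_append hpj
  have hfold : (List.foldl pvAStep (column.toList, ([] : List Char))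
      pvSpecialModifiers).1.length ≤ pre.length := by
    rw [hsplit, List.foldl_append,
      pvFoldl_const (fun x hx => pvEndsFalse_of_ne hrp (h1 x hx).1 (h1 x hx).2),
      List.foldl_cons, hc, pvAStep_strip, List.foldl_append,
      pvFoldl_const (fun x hx => pvEndsFalse_of_ne hrp2 (h2 x hx).1 (h2 x hx).2),
      List.foldl_cons, pvAStep_strip]
    exact pvFoldl_len l3 _
  have h3 := congrArg (fun r => r.2.2.toList.length) heq
  have hmi' : mi ∈ pvModifiers := by simpa using hmi
  simp only [check_special_modifiers_py, check_special_modifiers_py_alt, hrp] at h3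
  simp [hmi'] at h3
  omega

-- ===== VERDICT (by name: the statement is the Claim_ definition above) =====
theorem check_special_modifiers_py_spec : Claim_unchanged_check_special_modifiers_py := by
  intro column _ hnd
  simp only [D_check_special_modifiers_py, not_exists, not_and] at hnd
  have hnd' : ∀ s ∈ pvDSuffixes, PySem.Chars.endswith column.toList s = false := by
    intro s hs
    rw [Bool.eq_false_iff, Ne, PySem.Chars.endswith_iff]
    intro hsf
    fin_cases hs
    · exact hnd "|notmissing|missing" (by simp) hsf
    · exact hnd "|not0|missing" (by simp) hsf
    · exact hnd "|is0|missing" (by simp) hsf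
    · exact hnd "|share|missing" (by simp) hsf
    · exact hnd "|not0|notmissing" (by simp) hsf
    · exact hnd "|is0|notmissing" (by simp) hsf
    · exact hnd "|share|notmissing" (by simp) hsf
    · exact hnd "|is0|not0" (by simp) hsf
    · exact hnd "|share|not0" (by simp) hsf
    · exact hnd "|share|is0" (by simp) hsf
  simp only [check_special_modifiers_py, check_special_modifiers_py_alt]
  rcases hrp : pvRPartPipe column.toList with ⟨ho, t⟩
  cases ho with
  | none =>
    have hnp : '|' ∉ column.toList := (pvRPartPipe_none hrp).2
    have hfold : List.foldl pvAStep (column.toList, ([] : List Char)) pvSpecialModifiers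
        = (column.toList, []) :=
      pvFoldl_const fun x _ => pvEndsFalse_no_pipe hnp
    simp [hfold, pvAliases_getD]
  | some h =>
    obtain ⟨hc, hnt⟩ := pvRPartPipe_some hrp
    by_cases hmem : PySem.Set.contains pvModifiers t
    · -- trailing token is one of the five modifiers
      have ht5 : t = "missing".toList ∨ t = "notmissing".toList ∨ t = "not0".toList ∨
          t = "is0".toList ∨ t = "share".toList := by
        simpa [pvModifiers, PySem.Set.contains, PySem.Set.ofList] using hmem
      -- outside D_, the head does not itself end with a later modifier
      have hpost : ∀ x : List Char, ('|' :: x ++ '|' :: t) ∈ pvDSuffixes →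
          PySem.Chars.endswith h ('|' :: x) = false := by
        intro x hx
        exact pvEndsFalse_of_nd (by rw [← hc]; exact hnd' _ hx)
      have hne : ∀ x : List Char, '|' ∉ x → x ≠ t →
          PySem.Chars.endswith column.toList ('|' :: x) = false :=
        fun x hx hxt => pvEndsFalse_of_ne hrp hx hxt
      have hfold : List.foldl pvAStep (column.toList, ([] : List Char)) pvSpecialModifiers
          = (h, t) := by
        rcases ht5 with rfl | rfl | rfl | rfl | rfl
        · refine pvFold_case _ h _ []
            ["notmissing".toList, "not0".toList, "is0".toList, "share".toList] rfl hc
            (by simp) ?_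
          intro x hx
          fin_cases hx <;> exact hpost _ (by decide)
        · refine pvFold_case _ h _ ["missing".toList]
            ["not0".toList, "is0".toList, "share".toList] rfl hc ?_ ?_
          · intro x hx; fin_cases hx <;> exact hne _ (by decide) (by decide)
          · intro x hx; fin_cases hx <;> exact hpost _ (by decide)
        · refine pvFold_case _ h _ ["missing".toList, "notmissing".toList]
            ["is0".toList, "share".toList] rfl hc ?_ ?_
          · intro x hx; fin_cases hx <;> exact hne _ (by decide) (by decide)
          · intro x hx; fin_cases hx <;> exact hpost _ (by decide)
        · refine pvFold_case _ h _ ["missing".toList, "notmissing".toList, "not0".toList]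
            ["share".toList] rfl hc ?_ ?_
          · intro x hx; fin_cases hx <;> exact hne _ (by decide) (by decide)
          · intro x hx; fin_cases hx <;> exact hpost _ (by decide)
        · refine pvFold_case _ h _
            ["missing".toList, "notmissing".toList, "not0".toList, "is0".toList] [] rfl hc
            ?_ (by simp)
          intro x hx; fin_cases hx <;> exact hne _ (by decide) (by decide)
      have hmem' : t ∈ pvModifiers := by simpa using hmem
      simp [hmem', hfold, pvAliases_getD]
    · -- trailing token is not a modifier: A never strips
      have hfold : List.foldl pvAStep (column.toList, ([] : List Char)) pvSpecialModifiers
          = (column.toList, []) := by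
        refine pvFoldl_const fun x hx => ?_
        refine pvEndsFalse_of_ne hrp ?_ ?_
        · fin_cases hx <;> decide
        · intro hxt
          subst hxt
          exact hmem (by fin_cases hx <;> simp [pvModifiers, PySem.Set.contains, PySem.Set.ofList])
      have hmem' : t ∉ pvModifiers := by simpa using hmem
      simp [hmem', hfold, pvAliases_getD]

set_option maxHeartbeats 1000000 in
theorem check_special_modifiers_py_changed : Claim_changed_check_special_modifiers_py := by
  unfold Claim_changed_check_special_modifiers_py; decide

theorem check_special_modifiers_py_tight : Claim_exact_check_special_modifiers_py := by
  intro column _ hd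
  obtain ⟨s, hs, hsf⟩ := hd
  fin_cases hs <;> obtain ⟨pre, hpre⟩ := hsf
  · exact pvTight column pre "missing".toList "notmissing".toList
      [] [] ["not0".toList, "is0".toList, "share".toList] rfl
      (by rw [← hpre]; simp) (by decide) (by decide) (by simp) (by simp) (by decide)
  · exact pvTight column pre "missing".toList "not0".toList
      [] ["notmissing".toList] ["is0".toList, "share".toList] rfl
      (by rw [← hpre]; simp) (by decide) (by decide) (by simp)
      (by intro x hx; fin_cases hx <;> exact ⟨by decide, by decide⟩) (by decide)
  · exact pvTight column pre "missing".toList "is0".toList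
      [] ["notmissing".toList, "not0".toList] ["share".toList] rfl
      (by rw [← hpre]; simp) (by decide) (by decide) (by simp)
      (by intro x hx; fin_cases hx <;> exact ⟨by decide, by decide⟩) (by decide)
  · exact pvTight column pre "missing".toList "share".toList
      [] ["notmissing".toList, "not0".toList, "is0".toList] [] rfl
      (by rw [← hpre]; simp) (by decide) (by decide) (by simp)
      (by intro x hx; fin_cases hx <;> exact ⟨by decide, by decide⟩) (by decide)
  · exact pvTight column pre "notmissing".toList "not0".toList
      ["missing".toList] [] ["is0".toList, "share".toList] rfl
      (by rw [← hpre]; simp) (by decide) (by decide)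
      (by intro x hx; fin_cases hx <;> exact ⟨by decide, by decide⟩) (by simp) (by decide)
  · exact pvTight column pre "notmissing".toList "is0".toList
      ["missing".toList] ["not0".toList] ["share".toList] rfl
      (by rw [← hpre]; simp) (by decide) (by decide)
      (by intro x hx; fin_cases hx <;> exact ⟨by decide, by decide⟩)
      (by intro x hx; fin_cases hx <;> exact ⟨by decide, by decide⟩) (by decide)
  · exact pvTight column pre "notmissing".toList "share".toList
      ["missing".toList] ["not0".toList, "is0".toList] [] rfl
      (by rw [← hpre]; simp) (by decide) (by decide)
      (by intro x hx; fin_cases hx <;> exact ⟨by decide, by decide⟩)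
      (by intro x hx; fin_cases hx <;> exact ⟨by decide, by decide⟩) (by decide)
  · exact pvTight column pre "not0".toList "is0".toList
      ["missing".toList, "notmissing".toList] [] ["share".toList] rfl
      (by rw [← hpre]; simp) (by decide) (by decide)
      (by intro x hx; fin_cases hx <;> exact ⟨by decide, by decide⟩) (by simp) (by decide)
  · exact pvTight column pre "not0".toList "share".toList
      ["missing".toList, "notmissing".toList] ["is0".toList] [] rfl
      (by rw [← hpre]; simp) (by decide) (by decide)
      (by intro x hx; fin_cases hx <;> exact ⟨by decide, by decide⟩)
      (by intro x hx; fin_cases hx <;> exact ⟨by decide, by decide⟩) (by decide)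
  · exact pvTight column pre "is0".toList "share".toList
      ["missing".toList, "notmissing".toList, "not0".toList] [] [] rfl
      (by rw [← hpre]; simp) (by decide) (by decide)
      (by intro x hx; fin_cases hx <;> exact ⟨by decide, by decide⟩) (by simp) (by decide)
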